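-- pv_equiv track=rewrite | github.com/qeedquan/challenges | codewars/matrix-creating-hankel-matrices.py | hankel
-- ===== SOURCE A (Python) =====
-- import math
--
-- def catalan(n):
--     return math.comb(2*n, n) // (n+1)
--
-- def hankel(n):
--     m = []
--     for i in range(n):
--         p = []
--         for j in range(n):
--             p.append(catalan(i + j))
--         m.append(p)
--     return m
-- ===== SOURCE B (Python) =====
-- def hankel(n):
--     # DP: build the 2n-1 needed Catalan numbers by the multiplicative
--     # recurrence C(k) = C(k-1)*(4k-2)//(k+1), then index into that list.
--     if n <= 0:
--         return []
--     c = [1]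
--     prev = 1
--     for k in range(1, 2 * n - 1):
--         prev = prev * (4 * k - 2) // (k + 1)
--         c.append(prev)
--     return [[c[i + j] for j in range(n)] for i in range(n)]
-- ===== Notes on version B (the rewrite author's own statement) =====
-- stated objective: faster
-- what changed: B replaces the per-entry binomial-coefficient Catalan formula with one linear DP pass of the multiplicative recurrence C(k)=C(k-1)*(4k-2)//(k+1), building the 2n-1 needed values once and indexing them to fill the matrix.
import Mathlib
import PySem

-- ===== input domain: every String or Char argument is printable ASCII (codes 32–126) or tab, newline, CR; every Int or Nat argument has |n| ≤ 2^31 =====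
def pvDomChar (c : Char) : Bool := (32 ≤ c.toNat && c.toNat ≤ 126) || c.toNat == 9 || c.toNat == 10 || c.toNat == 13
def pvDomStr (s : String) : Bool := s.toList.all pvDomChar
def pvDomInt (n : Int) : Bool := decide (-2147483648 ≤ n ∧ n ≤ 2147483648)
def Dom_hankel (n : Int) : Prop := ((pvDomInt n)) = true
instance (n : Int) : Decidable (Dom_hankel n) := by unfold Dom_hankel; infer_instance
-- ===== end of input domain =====

-- B replaces A's per-entry binomial-coefficient formula by one linear DP pass of the
-- Catalan multiplicative recurrence; objective: faster (O(n^2) entries share one O(n) table).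

-- ===== PORT A =====
-- math.comb(2*k, k) // (k+1); catalan is only ever called with k = i + j ≥ 0,
-- where `.toNat` is exact.
def catalanA (k : Int) : Int :=
  PySem.Int.floordiv ((Nat.choose (2 * k).toNat k.toNat : Nat) : Int) (k + 1)

def hankel (n : Int) : List (List Int) :=
  (PySem.List.pyRange 0 n 1).foldl (fun m i =>
    m ++ [(PySem.List.pyRange 0 n 1).foldl (fun p j => p ++ [catalanA (i + j)]) []]) []

-- ===== PORT B =====
-- the fold state is (c, prev); c[i + j] has 0 ≤ i + j < len c always, so pyGetD is exact
def hankel_alt (n : Int) : List (List Int) :=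
  if n ≤ 0 then []
  else
    let st := (PySem.List.pyRange 1 (2 * n - 1) 1).foldl
      (fun (st : List Int × Int) k =>
        let prev := PySem.Int.floordiv (st.2 * (4 * k - 2)) (k + 1)
        (st.1 ++ [prev], prev)) ([1], 1)
    (PySem.List.pyRange 0 n 1).map (fun i =>
      (PySem.List.pyRange 0 n 1).map (fun j => PySem.List.pyGetD st.1 (i + j) 0))

-- ===== PRECONDITION & SPEC =====
def Spec_hankel (n : Int) (out : List (List Int)) : Prop := out = hankel_alt n
instance (n : Int) (out : List (List Int)) : Decidable (Spec_hankel n out) := by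
  unfold Spec_hankel; infer_instance

-- ===== CLAIM (what is proved, stated in full; the proofs are below) =====
def Claim_equal_hankel : Prop := ∀ (n : Int), Dom_hankel n → Spec_hankel n (hankel n)

-- ===== LEMMAS AND PROOFS =====

-- A's closed form computes the Catalan numbers
theorem catalanA_natCast (k : Nat) : catalanA (k : Int) = (catalan k : Int) := by
  unfold catalanA
  have h2 : ((2 : Int) * (k : Int)).toNat = 2 * k := by omega
  have hk : ((k : Int)).toNat = k := by omega
  have hc : ((k : Int) + 1) = ((k + 1 : Nat) : Int) := by push_cast; ring
  rw [h2, hk, hc, PySem.Int.floordiv_natCast]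
  have : Nat.choose (2 * k) k = Nat.centralBinom k := rfl
  rw [this, ← catalan_eq_centralBinom_div]

-- the exact multiplicative recurrence, in Nat
theorem catalan_rec (m : Nat) : (m + 2) * catalan (m + 1) = (4 * m + 2) * catalan m := by
  have h1 : (m + 2) * catalan (m + 1) = Nat.centralBinom (m + 1) :=
    succ_mul_catalan_eq_centralBinom (m + 1)
  have h2 : (m + 1) * Nat.centralBinom (m + 1) = 2 * (2 * m + 1) * Nat.centralBinom m :=
    Nat.succ_mul_centralBinom_succ m
  have h3 : (m + 1) * catalan m = Nat.centralBinom m := succ_mul_catalan_eq_centralBinom m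
  have h4 : (m + 1) * Nat.centralBinom (m + 1) = (m + 1) * ((4 * m + 2) * catalan m) := by
    rw [h2, ← h3]; ring
  have h5 : Nat.centralBinom (m + 1) = (4 * m + 2) * catalan m :=
    Nat.eq_of_mul_eq_mul_left (by omega) h4
  rw [h1, h5]

-- B's update step produces the next Catalan number
theorem step_rec (m : Nat) :
    PySem.Int.floordiv ((catalan m : Int) * (4 * ((m : Int) + 1) - 2)) (((m : Int) + 1) + 1)
      = (catalan (m + 1) : Int) := by
  have ha : (catalan m : Int) * (4 * ((m : Int) + 1) - 2) = ((catalan m * (4 * m + 2) : Nat) : Int) := by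
    push_cast; ring
  have hb : (((m : Int) + 1) + 1) = ((m + 2 : Nat) : Int) := by push_cast; ring
  rw [ha, hb, PySem.Int.floordiv_natCast]
  congr 1
  have : catalan m * (4 * m + 2) = (m + 2) * catalan (m + 1) := by
    rw [catalan_rec m]; ring
  rw [this, Nat.mul_div_cancel_left _ (by omega)]

-- the DP fold builds exactly the list of the first N+1 Catalan numbers
theorem fold_catalan (N : Nat) :
    (PySem.List.pyRange 1 (1 + (N : Int)) 1).foldl
      (fun (st : List Int × Int) k =>
        let prev := PySem.Int.floordiv (st.2 * (4 * k - 2)) (k + 1)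
        (st.1 ++ [prev], prev)) ([1], 1)
    = ((List.range (N + 1)).map (fun k => (catalan k : Int)), (catalan N : Int)) := by
  induction N with
  | zero =>
      rw [PySem.List.pyRange_one_eq_nil (by omega)]
      simp [List.range_succ]
  | succ N ih =>
      have hr : (1 : Int) + ((N + 1 : Nat) : Int) = (1 + (N : Int)) + 1 := by push_cast; ring
      rw [hr, PySem.List.pyRange_one_succ_right (by omega), List.foldl_append, ih]
      simp only [List.foldl_cons, List.foldl_nil]
      have h1 : (1 : Int) + (N : Int) = (N : Int) + 1 := by ring
      rw [h1, step_rec N, List.range_succ (n := N + 1)]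
      simp

-- the matrix both sides compute
def catMatrix (N : Nat) : List (List Int) :=
  (List.range N).map (fun i => (List.range N).map (fun j => (catalan (i + j) : Int)))

theorem hankel_eq (N : Nat) : hankel (N : Int) = catMatrix N := by
  unfold hankel catMatrix
  rw [PySem.List.pyRange_zero_natCast]
  rw [List.foldl_map, PySem.List.foldl_append_singleton_eq_map]
  simp only [List.nil_append]
  refine List.map_congr_left (fun i _ => ?_)
  rw [List.foldl_map, PySem.List.foldl_append_singleton_eq_map]
  simp only [List.nil_append]
  refine List.map_congr_left (fun j _ => ?_)
  have : (i : Int) + (j : Int) = ((i + j : Nat) : Int) := by push_cast; ring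
  rw [this, catalanA_natCast]

theorem hankel_alt_eq (N : Nat) (hN : 0 < N) : hankel_alt (N : Int) = catMatrix N := by
  unfold hankel_alt catMatrix
  rw [if_neg (by omega)]
  have hb : (2 : Int) * (N : Int) - 1 = 1 + ((2 * N - 2 : Nat) : Int) := by omega
  rw [hb, fold_catalan (2 * N - 2)]
  rw [PySem.List.pyRange_zero_natCast]
  simp only [List.map_map]
  refine List.map_congr_left (fun i hi => ?_)
  refine List.map_congr_left (fun j hj => ?_)
  simp only [Function.comp]
  have : ((i : Int) : Int) + (j : Int) = ((i + j : Nat) : Int) := by push_cast; ring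
  rw [this, PySem.List.pyGetD_natCast]
  have hi' := List.mem_range.mp hi
  have hj' := List.mem_range.mp hj
  rw [PySem.List.getD_map_range _ _ _ _ (by omega)]

-- ===== VERDICT (by name: the statement is the Claim_ definition above) =====
theorem hankel_spec : Claim_equal_hankel := by
  intro n _
  unfold Spec_hankel
  by_cases h : n ≤ 0
  · unfold hankel hankel_alt
    rw [PySem.List.pyRange_one_eq_nil h, if_pos h]
    rfl
  · have hn : n = ((n.toNat : Nat) : Int) := by omega
    rw [hn, hankel_eq, hankel_alt_eq _ (by omega)]
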